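-- pv_equiv track=rewrite | github.com/triglan/Y24_S1 | Script/_Homework/work2/11-34.py | getRightmostLowestPoint
-- ===== SOURCE A (Python) =====
-- def getRightmostLowestPoint(points):
--     i = 0
--     maxlen, maxindex = 0, -1
--     while i < len(points):
--         if points[i] > 0 and points[i+1] < 0:
--             if maxlen < points[i]**2 + points[i]**2:
--                 maxlen, maxindex = points[i]**2 + points[i]**2, i
--         i+=2
--     return maxindex
-- ===== SOURCE B (Python) =====
-- def getRightmostLowestPoint(points):
--     c = sorted((i for i in range(0, len(points), 2)
--                 if points[i] > 0 and points[i + 1] < 0),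
--                key=lambda i: points[i], reverse=True)
--     return c[0] if c else -1
-- ===== Notes on version B (the rewrite author's own statement) =====
-- stated objective: alternative
-- what changed: A's single running-max while-loop over a squared-length accumulator is replaced by sort-then-pick: the candidate even indices are sorted descending by their coordinate (Python's stable sort preserves the earliest index among ties, matching A's strict-improvement tie-break) and the head is returned.
import Mathlib
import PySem

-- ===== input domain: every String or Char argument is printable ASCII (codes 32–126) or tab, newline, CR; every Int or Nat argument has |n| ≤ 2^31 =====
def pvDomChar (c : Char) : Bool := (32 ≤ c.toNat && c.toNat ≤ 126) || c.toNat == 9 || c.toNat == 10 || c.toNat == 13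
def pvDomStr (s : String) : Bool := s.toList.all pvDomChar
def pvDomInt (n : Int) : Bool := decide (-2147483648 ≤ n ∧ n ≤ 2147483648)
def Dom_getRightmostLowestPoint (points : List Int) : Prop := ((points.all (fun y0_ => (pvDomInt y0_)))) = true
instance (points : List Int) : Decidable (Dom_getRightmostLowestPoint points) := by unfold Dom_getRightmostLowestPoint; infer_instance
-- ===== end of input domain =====

-- B replaces A's running-max while-loop by a stable descending sort of the candidate indices followed by taking the head (alternative algorithm, not claimed faster).

-- ===== PORT A =====
-- while-loop of A as structural recursion on the remaining length; points[i] / points[i+1]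
-- are ported as pyGetD with a junk default 0: inside Pre_ every access A performs is in range
-- (i < len from the loop guard; i+1 only where A does not raise), so the port is exact there.
def goA (points : List Int) (i : Nat) (maxlen maxindex : Int) : Int :=
  if _h : i < points.length then
    if 0 < PySem.List.pyGetD points (i : Int) 0 ∧ PySem.List.pyGetD points ((i : Int) + 1) 0 < 0 then
      if maxlen < (PySem.List.pyGetD points (i : Int) 0) ^ 2 + (PySem.List.pyGetD points (i : Int) 0) ^ 2 then
        goA points (i + 2) ((PySem.List.pyGetD points (i : Int) 0) ^ 2 + (PySem.List.pyGetD points (i : Int) 0) ^ 2) (i : Int)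
      else goA points (i + 2) maxlen maxindex
    else goA points (i + 2) maxlen maxindex
  else maxindex
termination_by points.length - i

def getRightmostLowestPoint (points : List Int) : Int :=
  goA points 0 0 (-1)

-- ===== PORT B =====
-- sorted(candidates, key=lambda i: points[i], reverse=True), then c[0] if c else -1;
-- same pyGetD remark as in A's port.
def getRightmostLowestPoint_alt (points : List Int) : Int :=
  let c := PySem.List.sorted
      ((PySem.List.pyRange 0 (points.length : Int) 2).filter
        (fun i => decide (0 < PySem.List.pyGetD points i 0 ∧ PySem.List.pyGetD points (i + 1) 0 < 0)))
      (fun i => PySem.List.pyGetD points i 0) true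
  match c with
  | i :: _ => i
  | [] => -1

-- ===== PRECONDITION & SPEC =====
-- Pre_ excludes exactly the inputs where Python A raises IndexError: an odd-length list whose
-- last element is positive (the loop reads points[i+1] past the end there). B raises identically.
def Pre_getRightmostLowestPoint (points : List Int) : Prop :=
  points.length % 2 = 0 ∨ points.getLastD 0 ≤ 0
instance (points : List Int) : Decidable (Pre_getRightmostLowestPoint points) := by
  unfold Pre_getRightmostLowestPoint; infer_instance

def pvWitness_getRightmostLowestPoint : List Int := [3, -1, 2, -5]

def Spec_getRightmostLowestPoint (points : List Int) (out : Int) : Prop := out = getRightmostLowestPoint_alt points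
instance (points : List Int) (out : Int) : Decidable (Spec_getRightmostLowestPoint points out) := by unfold Spec_getRightmostLowestPoint; infer_instance

-- ===== CLAIM (what is proved, stated in full; the proofs are below) =====
def Claim_equal_getRightmostLowestPoint : Prop := ∀ (points : List Int), Dom_getRightmostLowestPoint points → Pre_getRightmostLowestPoint points → Spec_getRightmostLowestPoint points (getRightmostLowestPoint points)

-- ===== LEMMAS AND PROOFS =====

-- abbreviations used only by the proofs
def pvKey (points : List Int) (j : Int) : Int := PySem.List.pyGetD points j 0

def pvP (points : List Int) (i : Int) : Bool :=
  decide (0 < PySem.List.pyGetD points i 0 ∧ PySem.List.pyGetD points (i + 1) 0 < 0)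

def pvStep (points : List Int) (acc : Option Int) (x : Int) : Option Int :=
  match acc with
  | none => some x
  | some m => if pvKey points m < pvKey points x then some x else some m

def pvPost (s : Option Int) : Int :=
  match s with
  | some i => i
  | none => -1

-- relation between A's (maxlen, maxindex) pair and the first-argmax Option state
def pvRel (points : List Int) (s : Option Int) (ml mi : Int) : Prop :=
  (s = none ∧ ml = 0 ∧ mi = -1) ∨
  (∃ j, s = some j ∧ mi = j ∧ 0 < pvKey points j ∧ ml = pvKey points j ^ 2 + pvKey points j ^ 2)

theorem pvSq_lt_iff {x y : Int} (hx : 0 < x) (hy : 0 < y) :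
    x ^ 2 + x ^ 2 < y ^ 2 + y ^ 2 ↔ x < y := by
  constructor <;> intro h <;> nlinarith

theorem pvRange_two_cons {a b : Int} (h : a < b) :
    PySem.List.pyRange a b 2 = a :: PySem.List.pyRange (a + 2) b 2 := by
  rw [PySem.List.pyRange_of_pos a b (by norm_num), PySem.List.pyRange_of_pos (a + 2) b (by norm_num)]
  rw [if_pos h]
  have hc : ((b - a + 2 - 1) / 2).toNat =
      (if a + 2 < b then ((b - (a + 2) + 2 - 1) / 2).toNat else 0) + 1 := by
    split_ifs with h2 <;> omega
  rw [hc, List.range_succ_eq_map, List.map_cons, List.map_map]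
  congr 1
  · ring_nf
  · apply List.map_congr_left
    intro k _
    simp [Function.comp]
    ring

theorem pvRange_two_nil {a b : Int} (h : b ≤ a) :
    PySem.List.pyRange a b 2 = [] := by
  rw [PySem.List.pyRange_of_pos a b (by norm_num), if_neg (by omega)]
  simp

-- A's loop equals the fold of pvStep (first strict argmax) over the candidate indices
theorem pvLoop_eq (points : List Int) :
    ∀ (d i : Nat), points.length - i ≤ d → ∀ (s : Option Int) (ml mi : Int),
      pvRel points s ml mi →
      goA points i ml mi =
        pvPost (List.foldl (pvStep points) s
          ((PySem.List.pyRange (i : Int) (points.length : Int) 2).filter (pvP points))) := by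
  intro d
  induction d with
  | zero =>
    intro i hle s ml mi hrel
    have hge : points.length ≤ i := by omega
    rw [goA]
    rw [dif_neg (by omega)]
    rw [pvRange_two_nil (by exact_mod_cast hge)]
    rcases hrel with ⟨_, _, h⟩ | ⟨j, hs, hj, _, _⟩ <;> simp_all [pvPost]
  | succ d ih =>
    intro i hle s ml mi hrel
    by_cases hi : i < points.length
    · rw [goA, dif_pos hi]
      rw [pvRange_two_cons (by exact_mod_cast hi)]
      rw [List.filter_cons]
      have hstep : ((i : Int) + 2) = ((i + 2 : Nat) : Int) := by push_cast; ring
      by_cases hp : 0 < PySem.List.pyGetD points (i : Int) 0 ∧ PySem.List.pyGetD points ((i : Int) + 1) 0 < 0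
      · rw [if_pos hp]
        have hpB : pvP points (i : Int) = true := decide_eq_true hp
        rw [hpB]
        have hki : 0 < pvKey points (i : Int) := hp.1
        rcases hrel with ⟨hs, hml, hmi⟩ | ⟨j, hs, hmi, hkj, hml⟩
        · subst hs hml hmi
          rw [if_pos (by nlinarith [hki])]
          rw [hstep]
          exact ih (i + 2) (by omega) (some (i : Int)) _ _
            (Or.inr ⟨(i : Int), rfl, rfl, hki, rfl⟩)
        · subst hs hml
          by_cases hlt : pvKey points j < pvKey points (i : Int)
          · rw [if_pos (show pvKey points j ^ 2 + pvKey points j ^ 2 <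
                PySem.List.pyGetD points (↑i) 0 ^ 2 + PySem.List.pyGetD points (↑i) 0 ^ 2 from
                (pvSq_lt_iff hkj hki).mpr hlt)]
            rw [if_pos (rfl : true = true), List.foldl_cons]
            simp only [pvStep]
            rw [if_pos hlt, hstep]
            exact ih (i + 2) (by omega) (some (i : Int)) _ _
              (Or.inr ⟨(i : Int), rfl, rfl, hki, rfl⟩)
          · rw [if_neg (show ¬(pvKey points j ^ 2 + pvKey points j ^ 2 <
                PySem.List.pyGetD points (↑i) 0 ^ 2 + PySem.List.pyGetD points (↑i) 0 ^ 2) from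
                fun hc => hlt ((pvSq_lt_iff hkj hki).mp hc))]
            rw [if_pos (rfl : true = true), List.foldl_cons]
            simp only [pvStep]
            rw [if_neg hlt, hstep]
            exact ih (i + 2) (by omega) (some j) _ _
              (Or.inr ⟨j, rfl, hmi, hkj, rfl⟩)
      · rw [if_neg hp]
        have hpB : pvP points (i : Int) = false := by
          simp only [pvP, decide_eq_false_iff_not]; exact hp
        rw [hpB]
        rw [hstep]
        exact ih (i + 2) (by omega) s ml mi hrel
    · rw [goA, dif_neg hi]
      rw [pvRange_two_nil (by exact_mod_cast (by omega : points.length ≤ i))]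
      rcases hrel with ⟨hs, _, hmi⟩ | ⟨j, hs, hj, _, _⟩ <;> simp_all [pvPost]

-- stability of the descending insertion: inserting x changes the head exactly as pvStep does
theorem pvHead_insertBy (key : Int → Int) (x : Int) (acc : List Int) :
    (PySem.List.insertBy (fun a b => decide (key b < key a)) x acc).head? =
      (match acc.head? with
       | none => some x
       | some m => if key m < key x then some x else some m) := by
  cases acc with
  | nil => simp [PySem.List.insertBy]
  | cons y ys =>
    by_cases h : key y < key x
    · simp [PySem.List.insertBy, h]
    · simp [PySem.List.insertBy, h]

-- head of the reverse-sorted list is the fold of the first-strict-argmax step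
theorem pvHead_sorted_rev (key : Int → Int) (xs : List Int) :
    ∀ acc : List Int,
      (List.foldl (fun acc x => PySem.List.insertBy (fun a b => decide (key b < key a)) x acc) acc xs).head? =
        List.foldl (fun s x => match s with
          | none => some x
          | some m => if key m < key x then some x else some m) acc.head? xs := by
  induction xs with
  | nil => intro acc; rfl
  | cons x t ih =>
    intro acc
    rw [List.foldl_cons, List.foldl_cons, ih, pvHead_insertBy]

theorem alt_eq_post (points : List Int) :
    getRightmostLowestPoint_alt points =
      pvPost (List.foldl (pvStep points) none
        ((PySem.List.pyRange 0 (points.length : Int) 2).filter (pvP points))) := by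
  unfold getRightmostLowestPoint_alt
  have hmatch : ∀ c : List Int, (match c with | i :: _ => i | [] => (-1 : Int)) = pvPost c.head? := by
    intro c; cases c <;> rfl
  rw [hmatch]
  rw [PySem.List.sorted_rev_eq_foldl_insertBy]
  rw [pvHead_sorted_rev]
  rfl

-- ===== VERDICT (by name: the statement is the Claim_ definition above) =====
theorem getRightmostLowestPoint_spec : Claim_equal_getRightmostLowestPoint := by
  intro points _ _
  unfold Spec_getRightmostLowestPoint getRightmostLowestPoint
  rw [alt_eq_post]
  exact pvLoop_eq points points.length 0 (by omega) none 0 (-1) (Or.inl ⟨rfl, rfl, rfl⟩)
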